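-- pv_equiv track=rewrite | github.com/MattJamesChampion/FretEnginePython | note/note.py | is_note_letter_valid
-- ===== SOURCE A (Python) =====
-- def is_note_letter_valid(input_note_letter):
--     """Check that input_note_letter is a valid note letter.
--
--     Args:
--         input_note_letter (str): The note letter that is being checked
--
--     Returns:
--         bool: Whether input_note_letter is a valid note letter or not
--
--     Raises:
--         TypeError: If input_note_letter is an invalid type
--     """
--     lower_bound = "a"
--     upper_bound = "g"
--
--     character_range = range(ord(lower_bound), ord(upper_bound) + 1)
--
--     valid_note_letters = [chr(letter) for letter in character_range]
--
--     try:
--         return input_note_letter.lower() in valid_note_letters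
--     except AttributeError:
--         raise TypeError("input_note_letter ({}) is an invalid "
--                         "type".format(input_note_letter))
-- ===== SOURCE B (Python) =====
-- def is_note_letter_valid(input_note_letter):
--     """Check that input_note_letter is a valid note letter (closed-form range check)."""
--     try:
--         c = input_note_letter.lower()
--     except AttributeError:
--         raise TypeError("input_note_letter ({}) is an invalid "
--                         "type".format(input_note_letter))
--     return len(c) == 1 and 'a' <= c <= 'g'
-- ===== Notes on version B (the rewrite author's own statement) =====
-- stated objective: simpler
-- what changed: Replaces the range()-built list of valid letters and the linear membership scan with a direct closed-form check: lowercase, then len==1 and 'a' <= c <= 'g'.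
import Mathlib
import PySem

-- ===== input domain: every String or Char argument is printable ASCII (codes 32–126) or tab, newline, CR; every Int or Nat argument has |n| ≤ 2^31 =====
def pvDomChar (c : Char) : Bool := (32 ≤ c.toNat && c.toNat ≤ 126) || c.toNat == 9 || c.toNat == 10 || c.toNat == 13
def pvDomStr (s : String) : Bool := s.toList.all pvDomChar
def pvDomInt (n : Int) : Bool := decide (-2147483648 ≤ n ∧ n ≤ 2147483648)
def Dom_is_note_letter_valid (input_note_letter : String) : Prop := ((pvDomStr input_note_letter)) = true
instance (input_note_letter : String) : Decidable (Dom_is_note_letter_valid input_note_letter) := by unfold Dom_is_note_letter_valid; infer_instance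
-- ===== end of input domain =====

-- B replaces A's range()-built list of valid letters and membership scan with a direct
-- closed-form check (lowercase, length 1, 'a' ≤ c ≤ 'g'); objective: simpler.
-- String arguments always have .lower(), so A never raises here and no Pre_ is needed.

-- ===== PORT A =====
def is_note_letter_valid (input_note_letter : String) : Bool :=
  -- lower_bound = "a"; upper_bound = "g"; range(ord(lower_bound), ord(upper_bound) + 1)
  let character_range := PySem.List.pyRange ('a'.toNat : Int) (('g'.toNat : Int) + 1) 1
  -- [chr(letter) for letter in character_range]
  let valid_note_letters := character_range.map (fun letter => String.ofList [Char.ofNat letter.toNat])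
  -- input_note_letter.lower() in valid_note_letters  (never raises for a str argument)
  valid_note_letters.contains (PySem.Str.lower input_note_letter)

-- ===== PORT B =====
def is_note_letter_valid_alt (input_note_letter : String) : Bool :=
  -- c = input_note_letter.lower(); return len(c) == 1 and 'a' <= c <= 'g'
  -- (the string comparison on a length-1 string is exactly the comparison on its one char)
  let c := (PySem.Str.lower input_note_letter).toList
  decide (c.length = 1) &&
    (match c with
     | [ch] => decide ('a' ≤ ch ∧ ch ≤ 'g')
     | _ => false)

-- ===== PRECONDITION & SPEC =====
def Spec_is_note_letter_valid (input_note_letter : String) (out : Bool) : Prop := out = is_note_letter_valid_alt input_note_letter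
instance (input_note_letter : String) (out : Bool) : Decidable (Spec_is_note_letter_valid input_note_letter out) := by unfold Spec_is_note_letter_valid; infer_instance

-- ===== CLAIM (what is proved, stated in full; the proofs are below) =====
def Claim_equal_is_note_letter_valid : Prop := ∀ (input_note_letter : String), Dom_is_note_letter_valid input_note_letter → Spec_is_note_letter_valid input_note_letter (is_note_letter_valid input_note_letter)

-- ===== LEMMAS AND PROOFS =====

theorem pv_ofList_single_eq_iff (c d : Char) : String.ofList [c] = String.ofList [d] ↔ c = d := by
  constructor
  · intro h
    have := congrArg String.toList h
    simpa using this
  · intro h; rw [h]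

theorem pv_char_range (c : Char) :
    (c == 'a' || c == 'b' || c == 'c' || c == 'd' || c == 'e' || c == 'f' || c == 'g')
    = decide ('a' ≤ c ∧ c ≤ 'g') := by
  rw [Bool.eq_iff_iff]
  simp only [Bool.or_eq_true, beq_iff_eq, decide_eq_true_eq, Char.le_def, Char.ext_iff,
    ← UInt32.toNat_inj, UInt32.le_iff_toNat_le,
    show ('a'.val.toNat = 97) from rfl, show ('b'.val.toNat = 98) from rfl,
    show ('c'.val.toNat = 99) from rfl, show ('d'.val.toNat = 100) from rfl,
    show ('e'.val.toNat = 101) from rfl, show ('f'.val.toNat = 102) from rfl,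
    show ('g'.val.toNat = 103) from rfl]
  omega

theorem pv_ports_eq (s : String) : is_note_letter_valid s = is_note_letter_valid_alt s := by
  unfold is_note_letter_valid is_note_letter_valid_alt
  have hv : (PySem.List.pyRange ('a'.toNat : Int) (('g'.toNat : Int) + 1) 1).map
      (fun letter => String.ofList [Char.ofNat letter.toNat])
      = ["a", "b", "c", "d", "e", "f", "g"] := by decide
  simp only [hv]
  rcases h : (PySem.Str.lower s).toList with _ | ⟨c, _ | ⟨c2, l⟩⟩
  · have ht : PySem.Str.lower s = "" := String.toList_injective (by simp [h])
    rw [ht]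
    decide
  · have ht : PySem.Str.lower s = String.ofList [c] := String.toList_injective (by simp [h])
    rw [ht]
    simp only [List.contains_cons, List.contains_nil,
      show ("a" : String) = String.ofList ['a'] from rfl,
      show ("b" : String) = String.ofList ['b'] from rfl,
      show ("c" : String) = String.ofList ['c'] from rfl,
      show ("d" : String) = String.ofList ['d'] from rfl,
      show ("e" : String) = String.ofList ['e'] from rfl,
      show ("f" : String) = String.ofList ['f'] from rfl,
      show ("g" : String) = String.ofList ['g'] from rfl, Bool.or_false]
    have hb : ∀ d : Char, (String.ofList [c] == String.ofList [d]) = (c == d) := by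
      intro d
      rw [Bool.eq_iff_iff]
      simp [pv_ofList_single_eq_iff]
    simp only [hb, List.length_cons, List.length_nil]
    simp only [← Bool.or_assoc] at *
    rw [pv_char_range]
    simp
  · have ht : PySem.Str.lower s = String.ofList (c :: c2 :: l) :=
      String.toList_injective (by simp [h])
    rw [ht]
    have hne : ∀ d : Char, (String.ofList (c :: c2 :: l) == String.ofList [d]) = false := by
      intro d
      rw [Bool.eq_false_iff]
      intro hbe
      have := congrArg String.toList (eq_of_beq hbe)
      simp at this
    simp only [List.contains_cons, List.contains_nil,
      show ("a" : String) = String.ofList ['a'] from rfl,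
      show ("b" : String) = String.ofList ['b'] from rfl,
      show ("c" : String) = String.ofList ['c'] from rfl,
      show ("d" : String) = String.ofList ['d'] from rfl,
      show ("e" : String) = String.ofList ['e'] from rfl,
      show ("f" : String) = String.ofList ['f'] from rfl,
      show ("g" : String) = String.ofList ['g'] from rfl, hne, Bool.or_false]
    simp

-- ===== VERDICT (by name: the statement is the Claim_ definition above) =====
theorem is_note_letter_valid_spec : Claim_equal_is_note_letter_valid := by
  intro s _
  unfold Spec_is_note_letter_valid
  exact pv_ports_eq s
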